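-- pv_equiv track=rewrite | github.com/sirebh-a11y/certi_nt | backend/app/modules/document_reader/service.py | _looks_like_aluminium_bozen_document
-- ===== SOURCE A (Python) =====
-- def _looks_like_aluminium_bozen_document(lines: list[str]) -> bool:
--     normalized_lines = [_normalize_line(line) for line in lines]
--     joined = "\n".join(normalized_lines)
--     has_delivery_header = "DELIVERY NOTE" in joined or "DOCUMENTO DI TRASPORTO" in joined
--     has_material_row = any("BARRA TONDA" in line for line in normalized_lines)
--     has_cast = "CAST NR." in joined or "CAST NR" in joined
--     has_internal_order = "RIF. NS. ODV" in joined
--     has_packing_signals = any(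
--         marker in joined
--         for marker in ("RIF. ORDINE AB ODV", "COD. COLATA", "COD. ART. CLIENTE", "LEGA STATO FISICO")
--     )
--     return (has_delivery_header and has_material_row and (has_cast or has_internal_order)) or has_packing_signals
--
-- def _normalize_line(line: str) -> str:
--     return " ".join(line.upper().replace("_", " ").split())
-- ===== SOURCE B (Python) =====
-- def _normalize_line(line: str) -> str:
--     return " ".join(line.upper().replace("_", " ").split())
--
--
-- def _looks_like_aluminium_bozen_document(lines: list[str]) -> bool:
--     # Single pass: no joined document string; OR the evidence flags in line by line.
--     # (No marker contains a newline, so per-line containment equals joined-string containment;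
--     # "CAST NR." is subsumed by "CAST NR" and dropped.)
--     has_delivery_header = False
--     has_material_row = False
--     has_cast = False
--     has_internal_order = False
--     has_packing_signals = False
--     for line in lines:
--         norm = _normalize_line(line)
--         has_delivery_header = has_delivery_header or "DELIVERY NOTE" in norm or "DOCUMENTO DI TRASPORTO" in norm
--         has_material_row = has_material_row or "BARRA TONDA" in norm
--         has_cast = has_cast or "CAST NR" in norm
--         has_internal_order = has_internal_order or "RIF. NS. ODV" in norm
--         has_packing_signals = has_packing_signals or any(
--             marker in norm
--             for marker in ("RIF. ORDINE AB ODV", "COD. COLATA", "COD. ART. CLIENTE", "LEGA STATO FISICO")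
--         )
--     return (has_delivery_header and has_material_row and (has_cast or has_internal_order)) or has_packing_signals
-- ===== Notes on version B (the rewrite author's own statement) =====
-- stated objective: alternative
-- what changed: B drops the "\n".join'ed document string entirely and makes one pass over the lines, OR-ing each evidence flag in per normalized line (dropping the redundant "CAST NR." test), relying on no marker spanning a newline.
import Mathlib
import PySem

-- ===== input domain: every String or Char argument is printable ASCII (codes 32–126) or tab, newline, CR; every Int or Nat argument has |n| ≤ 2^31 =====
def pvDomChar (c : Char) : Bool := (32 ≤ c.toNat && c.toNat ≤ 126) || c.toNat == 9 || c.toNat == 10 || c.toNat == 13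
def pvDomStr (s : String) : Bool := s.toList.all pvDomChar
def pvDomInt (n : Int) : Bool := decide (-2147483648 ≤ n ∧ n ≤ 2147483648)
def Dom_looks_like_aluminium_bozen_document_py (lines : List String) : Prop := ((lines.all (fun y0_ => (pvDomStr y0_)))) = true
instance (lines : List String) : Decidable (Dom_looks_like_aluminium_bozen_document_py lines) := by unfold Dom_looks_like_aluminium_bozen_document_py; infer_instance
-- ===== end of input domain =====

-- B drops the "\n".join'ed document string and ORs the evidence flags in during one pass
-- over the normalized lines (dropping the redundant "CAST NR." test): an alternative decomposition.


-- ===== PORT A =====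
-- _normalize_line: " ".join(line.upper().replace("_", " ").split())
def pvNormalizeLine (line : String) : String :=
  PySem.Str.join " " (PySem.Str.split₀ (PySem.Str.replace (PySem.Str.upper line) "_" " "))

def looks_like_aluminium_bozen_document_py (lines : List String) : Bool :=
  let normalized_lines := lines.map pvNormalizeLine
  let joined := PySem.Str.join "\n" normalized_lines
  let has_delivery_header := PySem.Str.isIn "DELIVERY NOTE" joined || PySem.Str.isIn "DOCUMENTO DI TRASPORTO" joined
  let has_material_row := normalized_lines.any (fun line => PySem.Str.isIn "BARRA TONDA" line)
  let has_cast := PySem.Str.isIn "CAST NR." joined || PySem.Str.isIn "CAST NR" joined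
  let has_internal_order := PySem.Str.isIn "RIF. NS. ODV" joined
  let has_packing_signals :=
    ["RIF. ORDINE AB ODV", "COD. COLATA", "COD. ART. CLIENTE", "LEGA STATO FISICO"].any
      (fun marker => PySem.Str.isIn marker joined)
  (has_delivery_header && has_material_row && (has_cast || has_internal_order)) || has_packing_signals

-- ===== PORT B =====
-- one pass, five flags OR-ed in per normalized line
def pvStep (st : Bool × Bool × Bool × Bool × Bool) (line : String) : Bool × Bool × Bool × Bool × Bool :=
  let norm := pvNormalizeLine line
  ( st.1 || PySem.Str.isIn "DELIVERY NOTE" norm || PySem.Str.isIn "DOCUMENTO DI TRASPORTO" norm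
  , st.2.1 || PySem.Str.isIn "BARRA TONDA" norm
  , st.2.2.1 || PySem.Str.isIn "CAST NR" norm
  , st.2.2.2.1 || PySem.Str.isIn "RIF. NS. ODV" norm
  , st.2.2.2.2 ||
      ["RIF. ORDINE AB ODV", "COD. COLATA", "COD. ART. CLIENTE", "LEGA STATO FISICO"].any
        (fun marker => PySem.Str.isIn marker norm) )

def looks_like_aluminium_bozen_document_py_alt (lines : List String) : Bool :=
  let st := lines.foldl pvStep (false, false, false, false, false)
  (st.1 && st.2.1 && (st.2.2.1 || st.2.2.2.1)) || st.2.2.2.2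

-- ===== PRECONDITION & SPEC =====
def Spec_looks_like_aluminium_bozen_document_py (lines : List String) (out : Bool) : Prop := out = looks_like_aluminium_bozen_document_py_alt lines
instance (lines : List String) (out : Bool) : Decidable (Spec_looks_like_aluminium_bozen_document_py lines out) := by unfold Spec_looks_like_aluminium_bozen_document_py; infer_instance

-- ===== CLAIM (what is proved, stated in full; the proofs are below) =====
def Claim_equal_looks_like_aluminium_bozen_document_py : Prop := ∀ (lines : List String), Dom_looks_like_aluminium_bozen_document_py lines → Spec_looks_like_aluminium_bozen_document_py lines (looks_like_aluminium_bozen_document_py lines)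

-- ===== LEMMAS AND PROOFS =====

-- a prefix of a ++ c :: b that avoids c is a prefix of a
lemma pv_prefix_of_prefix_append_cons {p a b : List Char} {c : Char}
    (hc : c ∉ p) (h : p <+: a ++ c :: b) : p <+: a := by
  rcases List.prefix_or_prefix_of_prefix h (a.prefix_append (c :: b)) with h1 | h1
  · exact h1
  · rcases h1 with ⟨t, ht⟩
    cases t with
    | nil => rw [List.append_nil] at ht; exact ht ▸ List.prefix_rfl
    | cons x t' =>
      exfalso
      apply hc
      rcases h with ⟨u, hu⟩
      rw [← ht, List.append_assoc, List.cons_append] at hu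
      have h2 := List.append_cancel_left hu
      have hx : x = c := (List.cons_eq_cons.mp h2).1
      rw [← ht, hx]
      exact List.mem_append_right a List.mem_cons_self

-- an occurrence of p avoiding c cannot cross c
lemma pv_infix_append_cons_iff {p a b : List Char} {c : Char} (hc : c ∉ p) :
    p <:+: a ++ c :: b ↔ p <:+: a ∨ p <:+: b := by
  constructor
  · intro h
    induction a with
    | nil =>
      rcases List.infix_cons_iff.1 h with hpre | hinf
      · cases p with
        | nil => exact Or.inl List.nil_infix
        | cons x p' =>
          rcases hpre with ⟨t, ht⟩
          exact absurd (by injection ht with h1 _; exact h1 ▸ List.mem_cons_self) hc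
      · exact Or.inr hinf
    | cons x a ih =>
      rcases List.infix_cons_iff.1 (by simpa using h) with hpre | hinf
      · exact Or.inl (pv_prefix_of_prefix_append_cons hc (by simpa using hpre)).isInfix
      · rcases ih hinf with h1 | h1
        · exact Or.inl (List.infix_cons h1)
        · exact Or.inr h1
  · rintro (h | h)
    · exact h.trans (a.prefix_append (c :: b)).isInfix
    · rcases h with ⟨s, t, hst⟩
      exact ⟨a ++ c :: s, t, by rw [← hst]; simp⟩

-- a newline-free nonempty pattern occurs in "\n".join(segs) iff it occurs in some segment
lemma pv_infix_join_iff (p : List Char) (hc : '\n' ∉ p) (hne : p ≠ []) :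
    ∀ segs : List (List Char), (p <:+: PySem.Chars.join ['\n'] segs ↔ ∃ s ∈ segs, p <:+: s) := by
  intro segs
  induction segs with
  | nil => simp [PySem.Chars.join_nil, List.infix_nil, hne]
  | cons s rest ih =>
    cases rest with
    | nil => simp [PySem.Chars.join_singleton]
    | cons s' rest' =>
      rw [PySem.Chars.join_cons_cons]
      rw [List.append_assoc]
      simp only [List.singleton_append]
      rw [pv_infix_append_cons_iff hc]
      rw [ih]
      simp

-- 'm in "\n".join(parts)' equals 'any(m in part)' for a newline-free nonempty marker
lemma pv_isIn_join_eq_any (m : String) (hc : '\n' ∉ m.toList) (hne : m.toList ≠ [])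
    (parts : List String) :
    PySem.Str.isIn m (PySem.Str.join "\n" parts) = parts.any (fun s => PySem.Str.isIn m s) := by
  rw [Bool.eq_iff_iff, PySem.Str.isIn_iff_infix, PySem.Str.toList_join]
  have : ("\n" : String).toList = ['\n'] := by decide
  rw [this, pv_infix_join_iff m.toList hc hne]
  simp [List.any_eq_true, PySem.Chars.isIn_iff_infix]

-- the fold state after a pass is the componentwise 'any'
lemma pv_foldl_step (lines : List String) (st : Bool × Bool × Bool × Bool × Bool) :
    lines.foldl pvStep st =
      ( st.1 || lines.any (fun l => PySem.Str.isIn "DELIVERY NOTE" (pvNormalizeLine l) || PySem.Str.isIn "DOCUMENTO DI TRASPORTO" (pvNormalizeLine l))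
      , st.2.1 || lines.any (fun l => PySem.Str.isIn "BARRA TONDA" (pvNormalizeLine l))
      , st.2.2.1 || lines.any (fun l => PySem.Str.isIn "CAST NR" (pvNormalizeLine l))
      , st.2.2.2.1 || lines.any (fun l => PySem.Str.isIn "RIF. NS. ODV" (pvNormalizeLine l))
      , st.2.2.2.2 || lines.any (fun l =>
          ["RIF. ORDINE AB ODV", "COD. COLATA", "COD. ART. CLIENTE", "LEGA STATO FISICO"].any
            (fun marker => PySem.Str.isIn marker (pvNormalizeLine l))) ) := by
  induction lines generalizing st with
  | nil => simp
  | cons l rest ih =>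
    rw [List.foldl_cons, ih]
    simp [pvStep, Bool.or_assoc]

-- "CAST NR." occurring implies "CAST NR" occurring
lemma pv_cast_absorb (s : String) (h : PySem.Str.isIn "CAST NR." s = true) :
    PySem.Str.isIn "CAST NR" s = true := by
  rw [PySem.Str.isIn_iff_infix] at h ⊢
  exact List.IsInfix.trans (by decide) h

-- any of a disjunction is the disjunction of the anys
lemma pv_any_or {α : Type} (l : List α) (p q : α → Bool) :
    l.any (fun x => p x || q x) = (l.any p || l.any q) := by
  induction l with
  | nil => simp
  | cons x rest ih => cases hp : p x <;> cases hq : q x <;> simp [hp, hq, ih]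

-- ===== VERDICT (by name: the statement is the Claim_ definition above) =====
theorem looks_like_aluminium_bozen_document_py_spec : Claim_equal_looks_like_aluminium_bozen_document_py := by
  intro lines _
  unfold Spec_looks_like_aluminium_bozen_document_py
  unfold looks_like_aluminium_bozen_document_py looks_like_aluminium_bozen_document_py_alt
  rw [pv_foldl_step]
  simp only [Bool.false_or, List.any_cons, List.any_nil, Bool.or_false, List.any_map,
    Function.comp_def]
  rw [pv_isIn_join_eq_any "DELIVERY NOTE" (by decide) (by decide),
      pv_isIn_join_eq_any "DOCUMENTO DI TRASPORTO" (by decide) (by decide),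
      pv_isIn_join_eq_any "CAST NR." (by decide) (by decide),
      pv_isIn_join_eq_any "CAST NR" (by decide) (by decide),
      pv_isIn_join_eq_any "RIF. NS. ODV" (by decide) (by decide),
      pv_isIn_join_eq_any "RIF. ORDINE AB ODV" (by decide) (by decide),
      pv_isIn_join_eq_any "COD. COLATA" (by decide) (by decide),
      pv_isIn_join_eq_any "COD. ART. CLIENTE" (by decide) (by decide),
      pv_isIn_join_eq_any "LEGA STATO FISICO" (by decide) (by decide)]
  simp only [List.any_map, Function.comp_def]
  rw [pv_any_or, pv_any_or, pv_any_or, pv_any_or]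
  cases hcd : lines.any (fun l => PySem.Str.isIn "CAST NR." (pvNormalizeLine l)) with
  | false => simp
  | true =>
    have hc2 : lines.any (fun l => PySem.Str.isIn "CAST NR" (pvNormalizeLine l)) = true := by
      rcases List.any_eq_true.1 hcd with ⟨l, hl, h⟩
      exact List.any_eq_true.2 ⟨l, hl, pv_cast_absorb _ h⟩
    simp at hc2
    have hc3 : (lines.any fun x =>
        PySem.Chars.isIn ['C', 'A', 'S', 'T', ' ', 'N', 'R'] (pvNormalizeLine x).toList) = true :=
      List.any_eq_true.2 hc2
    simp [hc3]
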